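-- pv_equiv track=rewrite | github.com/Brodski/scraper-dl-vids | SSScrapey-rework/src/utils/generic_stuff.py | getFromFancyMap
-- ===== SOURCE A (Python) =====
-- def getFromFancyMap(d: dict[int, list]):
--     # https://chatgpt.com/c/69278b8e-856c-8332-9475-66ce608d2298
--     # data: Dict[int, List[Vod]] = {
--     #     1: [a1,a2,a3],
--     #     2: [b1,b2,b3,b4,b5,b6],
--     #     3: [c1,c2],
--     # }
--     # outputs -> 1 column, 2nd column, 3rd, ....
--     # outputs -> a1,b1,c1, a2,b2,c2, a3,b3, b4, b5, b6
--     keys = d.keys()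
--     max_len = max(len(d[k]) for k in keys)
--     for x in range(max_len): # x = column
--         for y in keys: # y = row
--             row = d[y]
--             if x < len(row):
--                 yield row[x]
-- ===== SOURCE B (Python) =====
-- def getFromFancyMap(d: dict[int, list]):
--     # Bucket-by-column transpose: one row-major pass drops every element into
--     # its column's bucket, then the buckets are emitted in column order.
--     cols = []
--     for row in d.values():
--         if len(row) > len(cols):
--             cols.extend([] for _ in range(len(row) - len(cols)))
--         for x, v in enumerate(row):
--             cols[x].append(v)
--     for col in cols:
--         yield from col
-- ===== Notes on version B (the rewrite author's own statement) =====
-- stated objective: alternative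
-- what changed: A scans every key for every column index up to the global maximum length (column-major with a bounds test per key per column); B instead makes a single row-major pass transposing the data into per-column buckets and then concatenates the buckets, so no exhausted row is ever revisited.
import Mathlib
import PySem

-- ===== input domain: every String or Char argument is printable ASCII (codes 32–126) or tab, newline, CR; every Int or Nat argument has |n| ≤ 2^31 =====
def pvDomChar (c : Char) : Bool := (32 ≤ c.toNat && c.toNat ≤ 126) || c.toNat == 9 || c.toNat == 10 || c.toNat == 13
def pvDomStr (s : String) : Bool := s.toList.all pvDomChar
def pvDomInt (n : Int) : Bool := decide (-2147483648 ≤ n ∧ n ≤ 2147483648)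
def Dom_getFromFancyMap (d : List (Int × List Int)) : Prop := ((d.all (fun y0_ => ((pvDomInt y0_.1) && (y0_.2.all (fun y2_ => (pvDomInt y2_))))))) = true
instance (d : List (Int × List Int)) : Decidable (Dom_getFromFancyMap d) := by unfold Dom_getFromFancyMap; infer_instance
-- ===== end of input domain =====

-- B transposes the data in one row-major pass into per-column buckets and concatenates them,
-- instead of A's column-major rescans of every key; equal output on every non-empty dict
-- (both are generators, collected in yield order).

-- ===== PORT A =====
-- Literal port of A: keys = d.keys(); max_len = max(len(d[k]) for k in keys);
-- for x in range(max_len): for y in keys: row = d[y]; if x < len(row): yield row[x].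
def getFromFancyMap (d : List (Int × List Int)) : List Int :=
  let dd := PySem.Dict.mk d
  let keys := PySem.Dict.keys dd
  match PySem.List.max? (keys.map (fun k => ((PySem.Dict.get? dd k).getD []).length)) (fun v => v) with
  | none => []   -- max() of an empty sequence raises ValueError; excluded by Pre_
  | some maxLen =>
    (List.range maxLen).foldl (fun acc x =>
      keys.foldl (fun acc y =>
        let row := (PySem.Dict.get? dd y).getD []
        if x < row.length then acc ++ [row.getD x 0] else acc) acc) []

-- ===== PORT B =====
-- one row of B's outer loop: pad the bucket list to the row's length and append
-- element x of the row to bucket x (the two inner loops of Source B, fused structurally)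
def addRow : List (List Int) → List Int → List (List Int)
  | cols, [] => cols
  | [], v :: vs => [v] :: addRow [] vs
  | c :: cs, v :: vs => (c ++ [v]) :: addRow cs vs

def getFromFancyMap_alt (d : List (Int × List Int)) : List Int :=
  ((((PySem.Dict.mk d).values).foldl addRow []).flatten)

-- ===== PRECONDITION & SPEC =====
-- Pre_ excludes the empty dict, on which A's max() raises ValueError (B yields nothing there), and
-- association lists with duplicate keys, which do not represent a Python dict (duplicates collapse
-- into one key before either function runs, so the corner is an artefact of the representation).
def Pre_getFromFancyMap (d : List (Int × List Int)) : Prop :=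
  d ≠ [] ∧ (d.map Prod.fst).Nodup
instance (d : List (Int × List Int)) : Decidable (Pre_getFromFancyMap d) := by
  unfold Pre_getFromFancyMap; infer_instance
def pvWitness_getFromFancyMap : (List (Int × List Int)) := [(1, [10, 20]), (2, [30])]

def Spec_getFromFancyMap (d : List (Int × List Int)) (out : List Int) : Prop := out = getFromFancyMap_alt d
instance (d : List (Int × List Int)) (out : List Int) : Decidable (Spec_getFromFancyMap d out) := by
  unfold Spec_getFromFancyMap; infer_instance

-- ===== CLAIM (what is proved, stated in full; the proofs are below) =====
def Claim_equal_getFromFancyMap : Prop := ∀ (d : List (Int × List Int)), Dom_getFromFancyMap d → Pre_getFromFancyMap d → Spec_getFromFancyMap d (getFromFancyMap d)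

-- ===== LEMMAS AND PROOFS =====

-- the common normal form: for each column index j < n, the defined entries of column j in row order
def colsOf (n : Nat) (rows : List (List Int)) : List Int :=
  (List.range n).flatMap (fun j => rows.filterMap (fun r => r[j]?))

-- maximum row length (0 for no rows)
def maxLen (rows : List (List Int)) : Nat := rows.foldr (fun r a => max r.length a) 0

theorem addRow_length (row : List Int) : ∀ cols : List (List Int),
    (addRow cols row).length = max cols.length row.length := by
  induction row with
  | nil => intro cols; simp [addRow]
  | cons v vs ih =>
    intro cols
    cases cols with
    | nil => simp [addRow, ih]
    | cons c cs => simp only [addRow, List.length_cons, ih]; omega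

theorem addRow_getD (row : List Int) : ∀ (cols : List (List Int)) (j : Nat),
    (addRow cols row).getD j [] = cols.getD j [] ++ (row[j]?).toList := by
  induction row with
  | nil => intro cols j; simp [addRow]
  | cons v vs ih =>
    intro cols j
    cases cols with
    | nil =>
      cases j with
      | zero => simp [addRow]
      | succ j => simpa using ih [] j
    | cons c cs =>
      cases j with
      | zero => simp [addRow]
      | succ j => simpa using ih cs j

theorem getD_range_map (l : List (List Int)) :
    (List.range l.length).map (fun j => l.getD j []) = l := by
  apply List.ext_getElem (by simp)
  intro j h1 h2
  simp [List.getD_eq_getElem?_getD, List.getElem?_eq_getElem h2]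

theorem foldl_addRow (rows : List (List Int)) : ∀ acc : List (List Int),
    rows.foldl addRow acc =
      (List.range (max acc.length (maxLen rows))).map
        (fun j => acc.getD j [] ++ rows.filterMap (fun r => r[j]?)) := by
  induction rows with
  | nil =>
    intro acc
    simp only [List.foldl_nil, maxLen, List.foldr_nil, Nat.max_zero, List.filterMap_nil,
      List.append_nil]
    exact (getD_range_map acc).symm
  | cons r t ih =>
    intro acc
    simp only [List.foldl_cons, ih (addRow acc r)]
    have hlen : max (addRow acc r).length (maxLen t) = max acc.length (maxLen (r :: t)) := by
      rw [addRow_length]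
      simp only [maxLen, List.foldr_cons]
      omega
    rw [hlen]
    refine List.map_congr_left (fun j _ => ?_)
    rw [addRow_getD, List.filterMap_cons]
    cases h : r[j]? <;> simp_all

theorem flatten_buckets (rows : List (List Int)) :
    (rows.foldl addRow []).flatten = colsOf (maxLen rows) rows := by
  rw [foldl_addRow rows []]
  simp [colsOf, List.flatten_eq_flatMap, List.flatMap_map]

-- the PySem max over the row lengths of a non-empty list is maxLen
theorem max?_eq_maxLen (rows : List (List Int)) (m : Nat)
    (hm : PySem.List.max? (rows.map List.length) (fun v => v) = some m) :
    m = maxLen rows := by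
  have hmem : m ∈ rows.map List.length := PySem.List.max?_mem hm
  have hmax : ∀ l ∈ rows.map List.length, l ≤ m := PySem.List.max?_isMax hm
  -- maxLen rows = foldr max 0 over the lengths
  have hfold : maxLen rows = (rows.map List.length).foldr max 0 := by
    simp [maxLen, List.foldr_map]
  rw [hfold]
  generalize (rows.map List.length) = ns at hmem hmax
  clear hfold
  induction ns with
  | nil => simp at hmem
  | cons a t ih =>
    simp only [List.foldr_cons]
    rcases List.mem_cons.mp hmem with h | h
    · have h2 : ∀ l ∈ t, l ≤ m := fun l hl => hmax l (by simp [hl])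
      have h3 : t.foldr max 0 ≤ m := by
        clear ih hmem hmax
        induction t with
        | nil => simp
        | cons b s ihs =>
          simp only [List.foldr_cons]
          have := h2 b (by simp)
          have := ihs (fun l hl => h2 l (by simp [hl]))
          omega
      omega
    · have := ih h (fun l hl => hmax l (by simp [hl]))
      have := hmax a (by simp)
      omega

theorem lookup_nodup (d : List (Int × List Int)) (hnd : (d.map Prod.fst).Nodup) :
    ∀ p ∈ d, (PySem.Dict.mk d).get? p.1 = some p.2 := by
  induction d with
  | nil => intro p hp; simp at hp
  | cons q t ih =>
    intro p hp
    rw [PySem.Dict.get?_mk_cons]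
    rcases List.mem_cons.mp hp with h | h
    · subst h; simp
    · have hne : q.1 ≠ p.1 := by
        intro he
        have : p.1 ∈ t.map Prod.fst := List.mem_map_of_mem h
        simp only [List.map_cons, List.nodup_cons] at hnd
        exact hnd.1 (he ▸ this)
      simp only [beq_iff_eq, if_neg hne]
      exact ih (by simp only [List.map_cons, List.nodup_cons] at hnd; exact hnd.2) p h

-- A's inner loop over the keys, as a filterMap over the keys
theorem innerA (d : List (Int × List Int)) (x : Nat) :
    ∀ (keys : List Int) (acc : List Int),
      keys.foldl (fun acc y =>
        let row := ((PySem.Dict.mk d).get? y).getD []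
        if x < row.length then acc ++ [row.getD x 0] else acc) acc =
      acc ++ keys.filterMap (fun y =>
        let row := ((PySem.Dict.mk d).get? y).getD []
        if x < row.length then some (row.getD x 0) else none) := by
  intro keys
  induction keys with
  | nil => simp
  | cons k t ih =>
    intro acc
    simp only [List.foldl_cons, List.filterMap_cons]
    by_cases hc : x < (((PySem.Dict.mk d).get? k).getD []).length <;>
      simp only [hc, if_true, if_false, ih, List.append_assoc, List.singleton_append]

-- ===== VERDICT (by name: the statement is the Claim_ definition above) =====
theorem getFromFancyMap_spec : Claim_equal_getFromFancyMap := by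
  intro d _ hpre
  obtain ⟨hne, hnd⟩ := hpre
  unfold Spec_getFromFancyMap getFromFancyMap getFromFancyMap_alt
  simp only
  have hkeys : (PySem.Dict.mk d).keys = d.map Prod.fst := rfl
  have hvals : (PySem.Dict.mk d).values = d.map Prod.snd := rfl
  have hlook : ∀ p ∈ d, ((PySem.Dict.mk d).get? p.1).getD [] = p.2 := by
    intro p hp; rw [lookup_nodup d hnd p hp]; rfl
  have hlens : ((PySem.Dict.mk d).keys).map
        (fun k => (((PySem.Dict.mk d).get? k).getD []).length) =
      (d.map Prod.snd).map List.length := by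
    rw [hkeys, List.map_map, List.map_map]
    exact List.map_congr_left (fun p hp => by simp [hlook p hp])
  rcases hm : PySem.List.max? (((PySem.Dict.mk d).keys).map
      (fun k => (((PySem.Dict.mk d).get? k).getD []).length)) (fun v => v) with _ | m
  · exfalso
    have := (PySem.List.max?_eq_none_iff _ _).mp hm
    rw [hlens] at this
    cases d with
    | nil => exact hne rfl
    | cons p t => simp at this
  · dsimp only
    rw [hlens] at hm
    -- A's double loop = colsOf m (values)
    have hA : (List.range m).foldl (fun acc x =>
        ((PySem.Dict.mk d).keys).foldl (fun acc y =>
          let row := ((PySem.Dict.mk d).get? y).getD []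
          if x < row.length then acc ++ [row.getD x 0] else acc) acc) [] =
        colsOf m (d.map Prod.snd) := by
      have hcol : ∀ x : Nat, ((PySem.Dict.mk d).keys).filterMap (fun y =>
          let row := ((PySem.Dict.mk d).get? y).getD []
          if x < row.length then some (row.getD x 0) else none) =
          (d.map Prod.snd).filterMap (fun r => r[x]?) := by
        intro x
        rw [hkeys, List.filterMap_map, List.filterMap_map]
        refine List.filterMap_congr (fun p hp => ?_)
        simp only [Function.comp_apply, hlook p hp]
        by_cases hc : x < p.2.length
        · simp [hc, List.getD_eq_getElem?_getD]
        · simp [hc]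
      calc (List.range m).foldl _ [] =
            (List.range m).foldl (fun acc x => acc ++
              (d.map Prod.snd).filterMap (fun r => r[x]?)) [] := by
              apply PySem.List.foldl_congr_mem
              intro acc x _
              exact (innerA d x _ acc).trans (by rw [hcol x])
        _ = colsOf m (d.map Prod.snd) := by
              rw [PySem.List.foldl_append_eq_flatMap]
              simp [colsOf]
    rw [hA, hvals, flatten_buckets, max?_eq_maxLen _ m hm]
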